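-- pv_equiv track=rewrite | github.com/wbing520/ai-performance-engineering | scripts/master_profile.py | _merge_examples
-- ===== SOURCE A (Python) =====
-- from collections import OrderedDict
-- from typing import Dict, Iterable, List, Optional
--
-- def _dedupe(items: Iterable[str]) -> List[str]:
--     ordered = OrderedDict.fromkeys(items)
--     return list(ordered.keys())
--
-- def _merge_examples(arguments: List[str], extra_examples: List[str]) -> List[str]:
--     if not extra_examples:
--         return list(arguments)
--
--     args = list(arguments)
--     try:
--         idx = args.index("--examples")
--     except ValueError:
--         return args + ["--examples", *_dedupe(extra_examples)]
--
--     args.pop(idx)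
--     existing: List[str] = []
--     while idx < len(args) and not args[idx].startswith("--"):
--         existing.append(args.pop(idx))
--
--     combined = _dedupe(existing + extra_examples)
--     if combined:
--         args[idx:idx] = ["--examples", *combined]
--     return args
-- ===== SOURCE B (Python) =====
-- def _dedupe(items):
--     seen = set()
--     out = []
--     for item in items:
--         if item not in seen:
--             seen.add(item)
--             out.append(item)
--     return out
--
--
-- def _merge_examples(arguments, extra_examples):
--     if not extra_examples:
--         return list(arguments)
--     for i, tok in enumerate(arguments):
--         if tok == "--examples":
--             j = i + 1
--             while j < len(arguments) and not arguments[j].startswith("--"):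
--                 j += 1
--             return (arguments[:i]
--                     + ["--examples"]
--                     + _dedupe(arguments[i + 1:j] + extra_examples)
--                     + arguments[j:])
--     return list(arguments) + ["--examples"] + _dedupe(extra_examples)
-- ===== Notes on version B (the rewrite author's own statement) =====
-- stated objective: simpler
-- what changed: B replaces A's in-place pop/splice surgery (index, repeated pop(idx), slice assignment) with a single forward scan that rebuilds the list from slices, and replaces the OrderedDict-based dedupe with a seen-set one-pass dedupe.
import Mathlib
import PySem

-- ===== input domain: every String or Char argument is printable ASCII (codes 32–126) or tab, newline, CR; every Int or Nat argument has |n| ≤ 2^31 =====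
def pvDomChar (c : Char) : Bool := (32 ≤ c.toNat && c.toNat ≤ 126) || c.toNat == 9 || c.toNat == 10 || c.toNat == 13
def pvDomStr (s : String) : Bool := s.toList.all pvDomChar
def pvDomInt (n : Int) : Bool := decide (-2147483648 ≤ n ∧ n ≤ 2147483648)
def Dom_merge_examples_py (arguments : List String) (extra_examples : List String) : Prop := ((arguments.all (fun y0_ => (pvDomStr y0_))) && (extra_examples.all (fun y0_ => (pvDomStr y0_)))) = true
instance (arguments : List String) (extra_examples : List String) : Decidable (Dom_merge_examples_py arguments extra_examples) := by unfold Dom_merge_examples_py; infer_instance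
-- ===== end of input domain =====

-- B rebuilds the argument list in one forward slice-based pass instead of A's in-place pop/splice; objective: simpler.

-- ===== PORT A =====
-- A's while loop: 'while idx < len(args) and not args[idx].startswith("--"): existing.append(args.pop(idx))'
-- args.pop(idx) at an in-range index is exactly (args[idx], args.eraseIdx idx).
def loopA (idx : Nat) (args existing : List String) : List String × List String :=
  if h : idx < args.length then
    if PySem.Str.startswith args[idx] "--" then (args, existing)
    else loopA idx (args.eraseIdx idx) (existing ++ [args[idx]])
  else (args, existing)
termination_by args.length
decreasing_by simp [List.length_eraseIdx, h]; omega

def merge_examples_py (arguments : List String) (extra_examples : List String) : List String :=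
  if extra_examples = [] then arguments
  else
    match PySem.List.index? arguments "--examples" with
    | none => arguments ++ ["--examples"] ++ PySem.List.dedup extra_examples  -- _dedupe = OrderedDict.fromkeys = PySem.List.dedup
    | some idx =>
      let args := arguments.eraseIdx idx  -- args.pop(idx), value discarded
      let r := loopA idx args []
      let combined := PySem.List.dedup (r.2 ++ extra_examples)
      if combined = [] then r.1
      else r.1.take idx ++ ["--examples"] ++ combined ++ r.1.drop idx  -- args[idx:idx] = ["--examples", *combined]

-- ===== PORT B =====
-- B's _dedupe: a seen-set and an output list built in one pass.
def dedupeB (items : List String) : List String :=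
  (items.foldl
    (fun (st : PySem.Set String × List String) item =>
      if PySem.Set.contains st.1 item then st
      else (PySem.Set.add st.1 item, st.2 ++ [item]))
    (PySem.Set.empty, [])).2

-- 'for i, tok in enumerate(arguments): if tok == "--examples": …' — index of the first hit.
def findExamplesB : List String → Nat → Option Nat
  | [], _ => none
  | t :: ts, i => if t = "--examples" then some i else findExamplesB ts (i + 1)

-- 'j = i + 1; while j < len(arguments) and not arguments[j].startswith("--"): j += 1'
def scanFlagB (arguments : List String) (j : Nat) : Nat :=
  if h : j < arguments.length then
    if PySem.Str.startswith arguments[j] "--" then j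
    else scanFlagB arguments (j + 1)
  else j
termination_by arguments.length - j

def merge_examples_py_alt (arguments : List String) (extra_examples : List String) : List String :=
  if extra_examples = [] then arguments
  else
    match findExamplesB arguments 0 with
    | some i =>
      let j := scanFlagB arguments (i + 1)
      arguments.take i ++ ["--examples"]
        ++ dedupeB ((arguments.drop (i + 1)).take (j - (i + 1)) ++ extra_examples)  -- arguments[i+1:j]
        ++ arguments.drop j  -- arguments[j:]
    | none => arguments ++ ["--examples"] ++ dedupeB extra_examples

-- ===== PRECONDITION & SPEC =====
def Spec_merge_examples_py (arguments : List String) (extra_examples : List String) (out : List String) : Prop := out = merge_examples_py_alt arguments extra_examples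
instance (arguments : List String) (extra_examples : List String) (out : List String) : Decidable (Spec_merge_examples_py arguments extra_examples out) := by unfold Spec_merge_examples_py; infer_instance

-- ===== CLAIM (what is proved, stated in full; the proofs are below) =====
def Claim_equal_merge_examples_py : Prop := ∀ (arguments : List String) (extra_examples : List String), Dom_merge_examples_py arguments extra_examples → Spec_merge_examples_py arguments extra_examples (merge_examples_py arguments extra_examples)

-- ===== LEMMAS AND PROOFS =====

lemma dedupeB_fold (items : List String) (s : PySem.Set String) :
    items.foldl
      (fun (st : PySem.Set String × List String) item =>
        if PySem.Set.contains st.1 item then st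
        else (PySem.Set.add st.1 item, st.2 ++ [item]))
      (s, s) = (items.foldl PySem.Set.add s, items.foldl PySem.Set.add s) := by
  induction items generalizing s with
  | nil => rfl
  | cons x xs ih =>
    simp only [List.foldl_cons]
    by_cases h : PySem.Set.contains s x
    · rw [if_pos h, ih, show PySem.Set.add s x = s from by simp only [PySem.Set.add, if_pos h]]
    · rw [if_neg h, show PySem.Set.add s x = s ++ [x] from by simp only [PySem.Set.add, if_neg h]]
      exact ih (s ++ [x])

lemma dedupeB_eq_dedup (items : List String) :
    dedupeB items = PySem.List.dedup items := by
  rw [PySem.List.dedup_eq_ofList, PySem.Set.ofList_eq_foldl, dedupeB,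
    show (PySem.Set.empty : PySem.Set String) = [] from rfl]
  rw [dedupeB_fold]

lemma findExamplesB_eq (xs : List String) (i : Nat) :
    findExamplesB xs i = (PySem.List.index? xs "--examples").map (· + i) := by
  induction xs generalizing i with
  | nil => simp [findExamplesB, PySem.List.index?]
  | cons x xs ih =>
    by_cases h : x = "--examples"
    · subst h
      rw [PySem.List.index?_cons_self]
      simp [findExamplesB]
    · rw [PySem.List.index?_cons_of_ne xs h]
      simp only [findExamplesB, if_neg h, ih, Option.map_map]
      cases PySem.List.index? xs "--examples" with
      | none => simp
      | some k => simp; omega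

lemma dedup_ne_nil (l extra : List String) (h : extra ≠ []) :
    PySem.List.dedup (l ++ extra) ≠ [] := by
  intro hnil
  cases extra with
  | nil => exact h rfl
  | cons e es =>
    have : e ∈ PySem.List.dedup (l ++ (e :: es)) := by
      rw [PySem.List.mem_dedup]; simp
    rw [hnil] at this; exact absurd this (List.not_mem_nil)

lemma loopA_spec (pre rest ex : List String) :
    loopA pre.length (pre ++ rest) ex =
      (pre ++ rest.dropWhile (fun t => !PySem.Str.startswith t "--"),
       ex ++ rest.takeWhile (fun t => !PySem.Str.startswith t "--")) := by
  induction rest generalizing ex with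
  | nil => rw [loopA]; simp
  | cons r rs ih =>
    rw [loopA]
    have hlt : pre.length < (pre ++ r :: rs).length := by simp
    have hget : (pre ++ r :: rs)[pre.length]'hlt = r := by
      simp [List.getElem_append_right]
    have herase : (pre ++ r :: rs).eraseIdx pre.length = pre ++ rs := by
      rw [List.eraseIdx_append_of_length_le (by omega)]
      simp
    rw [dif_pos hlt]
    simp only [hget, herase]
    by_cases h : PySem.Str.startswith r "--"
    · rw [if_pos h, List.dropWhile_cons, List.takeWhile_cons]
      have h' : PySem.Chars.startswith r.toList ['-', '-'] = true := by simpa using h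
      simp [h']
    · rw [if_neg h, ih, List.dropWhile_cons, List.takeWhile_cons]
      have h' : PySem.Chars.startswith r.toList ['-', '-'] = false := by simpa using h
      simp [h']

lemma scanFlagB_spec (pre suf : List String) (h : pre.length ≤ (pre ++ suf).length) :
    scanFlagB (pre ++ suf) pre.length =
      pre.length + (suf.takeWhile (fun t => !PySem.Str.startswith t "--")).length := by
  induction suf generalizing pre with
  | nil => rw [scanFlagB]; simp
  | cons r rs ih =>
    rw [scanFlagB]
    have hlt : pre.length < (pre ++ r :: rs).length := by simp
    have hget : (pre ++ r :: rs)[pre.length]'hlt = r := by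
      simp [List.getElem_append_right]
    rw [dif_pos hlt]
    simp only [hget]
    by_cases h : PySem.Str.startswith r "--"
    · rw [if_pos h, List.takeWhile_cons]
      have h' : PySem.Chars.startswith r.toList ['-', '-'] = true := by simpa using h
      simp [h']
    · have := ih (pre ++ [r]) (by simp)
      simp only [List.append_assoc, List.singleton_append, List.length_append,
        List.length_cons, List.length_nil] at this
      rw [if_neg h, this, List.takeWhile_cons]
      have h' : PySem.Chars.startswith r.toList ['-', '-'] = false := by simpa using h
      simp [h']
      omega

-- ===== VERDICT (by name: the statement is the Claim_ definition above) =====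
theorem merge_examples_py_spec : Claim_equal_merge_examples_py := by
  intro arguments extra_examples _hdom
  unfold Spec_merge_examples_py merge_examples_py merge_examples_py_alt
  by_cases hex : extra_examples = []
  · simp [hex]
  · simp only [if_neg hex]
    rw [findExamplesB_eq]
    cases hidx : PySem.List.index? arguments "--examples" with
    | none => simp [dedupeB_eq_dedup]
    | some idx =>
      simp only [Option.map_some]
      obtain ⟨pre, suf, harg, hlen, -⟩ := (PySem.List.index?_eq_some_iff _ _ _).1 hidx
      subst harg
      subst hlen
      have herase : (pre ++ "--examples" :: suf).eraseIdx pre.length = pre ++ suf := by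
        rw [List.eraseIdx_append_of_length_le le_rfl]; simp
      have hloop := loopA_spec pre suf []
      have hscan : scanFlagB ((pre ++ ["--examples"]) ++ suf) (pre.length + 1) =
          pre.length + 1 + (suf.takeWhile (fun t => !PySem.Str.startswith t "--")).length := by
        simpa using scanFlagB_spec (pre ++ ["--examples"]) suf (by simp)
      have htd := List.takeWhile_append_dropWhile
        (p := fun t => !PySem.Str.startswith t "--") (l := suf)
      have htake : suf.take (suf.takeWhile (fun t => !PySem.Str.startswith t "--")).length
          = suf.takeWhile (fun t => !PySem.Str.startswith t "--") := by
        calc suf.take (suf.takeWhile (fun t => !PySem.Str.startswith t "--")).length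
            = ((suf.takeWhile (fun t => !PySem.Str.startswith t "--"))
                ++ suf.dropWhile (fun t => !PySem.Str.startswith t "--")).take
                (suf.takeWhile (fun t => !PySem.Str.startswith t "--")).length := by rw [htd]
          _ = _ := List.take_left
      have hdrop : ((pre ++ ["--examples"]) ++ suf).drop
            (pre.length + 1 + (suf.takeWhile (fun t => !PySem.Str.startswith t "--")).length)
          = suf.dropWhile (fun t => !PySem.Str.startswith t "--") := by
        rw [show pre.length + 1 + (suf.takeWhile (fun t => !PySem.Str.startswith t "--")).length
              = ((pre ++ ["--examples"]) ++ suf.takeWhile (fun t => !PySem.Str.startswith t "--")).length from by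
            simp only [List.length_append, List.length_cons, List.length_nil]]
        rw [show (pre ++ ["--examples"]) ++ suf
              = ((pre ++ ["--examples"]) ++ suf.takeWhile (fun t => !PySem.Str.startswith t "--"))
                ++ suf.dropWhile (fun t => !PySem.Str.startswith t "--") from by
            rw [List.append_assoc (pre ++ ["--examples"]), htd]]
        exact List.drop_left
      simp only [herase, hloop, List.nil_append]
      rw [if_neg (dedup_ne_nil _ _ hex)]
      rw [List.append_cons pre "--examples" suf, hscan]
      rw [show ((pre ++ ["--examples"]) ++ suf).drop (pre.length + 1)
            = suf from by
          rw [show pre.length + 1 = (pre ++ ["--examples"]).length from by simp, List.drop_left]]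
      rw [show pre.length + 1 + (suf.takeWhile (fun t => !PySem.Str.startswith t "--")).length
            - (pre.length + 1)
            = (suf.takeWhile (fun t => !PySem.Str.startswith t "--")).length from by omega]
      rw [htake, hdrop, dedupeB_eq_dedup]
      simp only [Nat.add_zero]
      rw [show ((pre ++ ["--examples"]) ++ suf).take pre.length = pre from by
          rw [List.append_assoc]; exact List.take_left]
      rw [List.take_left, List.drop_left]
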